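-- pv_equiv track=rewrite | github.com/alpergel/MiceVision | app/MiceVision.py | count_groups_of_ones
-- ===== SOURCE A (Python) =====
-- def count_groups_of_ones(lst, cons):
--     counter = 0  # Initialize the counter
--     i = 0  # Start iterating from the first index
--     while i < len(lst):
--         # Check if the current element is 0 and at least the next three elements contain a 1
--         if lst[i] == 0:
--             i += 1  # Move past the 0
--             start = i  # Mark the start of potential consecutive 1's
--             # Count the number of consecutive 1's following the 0
--             while i < len(lst) and lst[i] == 1:
--                 i += 1
--             # If we found at least three consecutive 1's after a 0, increment the counter
--             if i - start >= cons:
--                 counter += 1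
--         else:
--             i += 1  # Move to the next element if the current one is not 0
--     return counter
-- ===== SOURCE B (Python) =====
-- def count_groups_of_ones(lst, cons):
--     # Single backward pass: walking right-to-left, `ones` is the length of the
--     # run of 1's starting just after the current position; each 0 seen counts
--     # iff that run is at least `cons`.
--     counter = 0
--     ones = 0
--     for x in reversed(lst):
--         if x == 0:
--             if ones >= cons:
--                 counter += 1
--             ones = 0
--         elif x == 1:
--             ones += 1
--         else:
--             ones = 0
--     return counter
-- ===== Notes on version B (the rewrite author's own statement) =====
-- stated objective: simpler
-- what changed: Replaced the index-threading scan with a nested inner while-loop by a single backward pass that maintains the length of the run of 1's to the right and counts each 0 whose following run is long enough.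
import Mathlib
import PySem

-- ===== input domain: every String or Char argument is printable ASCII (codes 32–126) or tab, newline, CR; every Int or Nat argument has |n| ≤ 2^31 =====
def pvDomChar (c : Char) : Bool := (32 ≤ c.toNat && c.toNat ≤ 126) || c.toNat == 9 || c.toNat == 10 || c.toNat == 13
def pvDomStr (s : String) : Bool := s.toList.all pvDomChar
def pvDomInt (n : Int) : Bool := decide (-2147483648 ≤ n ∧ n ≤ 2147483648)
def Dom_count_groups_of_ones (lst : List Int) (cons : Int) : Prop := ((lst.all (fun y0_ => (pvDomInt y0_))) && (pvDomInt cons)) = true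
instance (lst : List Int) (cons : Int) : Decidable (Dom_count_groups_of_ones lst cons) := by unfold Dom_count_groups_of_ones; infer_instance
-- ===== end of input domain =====

-- B replaces A's index scan with inner while-loop by one backward pass tracking the run of 1's to the right (simpler).


-- ===== PORT A =====
-- inner while-loop of A: count of consecutive leading 1's and the remainder of the list
def pvAInner : List Int → Int × List Int
  | [] => (0, [])
  | x :: r => if x = 1 then ((pvAInner r).1 + 1, (pvAInner r).2) else (0, x :: r)

theorem pvAInner_len (l : List Int) : (pvAInner l).2.length ≤ l.length := by
  induction l with
  | nil => simp [pvAInner]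
  | cons x r ih =>
    simp only [pvAInner]
    split
    · exact le_trans ih (Nat.le_succ _)
    · simp

-- outer while-loop of A, carrying the counter accumulator
def pvAGo (cons : Int) : List Int → Int → Int
  | [], counter => counter
  | x :: r, counter =>
    if x = 0 then
      if (pvAInner r).1 ≥ cons then pvAGo cons (pvAInner r).2 (counter + 1)
      else pvAGo cons (pvAInner r).2 counter
    else pvAGo cons r counter
termination_by l _ => l.length
decreasing_by
  · exact Nat.lt_succ_of_le (pvAInner_len r)
  · exact Nat.lt_succ_of_le (pvAInner_len r)
  · simp

def count_groups_of_ones (lst : List Int) (cons : Int) : Int := pvAGo cons lst 0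

-- ===== PORT B =====
-- one pass over reversed(lst); state = (counter, length of the run of 1's just to the right)
def pvBStep (cons : Int) (s : Int × Int) (x : Int) : Int × Int :=
  if x = 0 then (s.1 + (if s.2 ≥ cons then 1 else 0), 0)
  else if x = 1 then (s.1, s.2 + 1)
  else (s.1, 0)

def count_groups_of_ones_alt (lst : List Int) (cons : Int) : Int :=
  (lst.reverse.foldl (pvBStep cons) (0, 0)).1

-- ===== PRECONDITION & SPEC =====
def Spec_count_groups_of_ones (lst : List Int) (cons : Int) (out : Int) : Prop := out = count_groups_of_ones_alt lst cons
instance (lst : List Int) (cons : Int) (out : Int) : Decidable (Spec_count_groups_of_ones lst cons out) := by unfold Spec_count_groups_of_ones; infer_instance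

-- ===== CLAIM (what is proved, stated in full; the proofs are below) =====
def Claim_equal_count_groups_of_ones : Prop := ∀ (lst : List Int) (cons : Int), Dom_count_groups_of_ones lst cons → Spec_count_groups_of_ones lst cons (count_groups_of_ones lst cons)

-- ===== LEMMAS AND PROOFS =====

-- B's foldl over the reversed list is a foldr over the list
theorem pvB_foldr (lst : List Int) (cons : Int) :
    count_groups_of_ones_alt lst cons = (lst.foldr (fun x s => pvBStep cons s x) (0, 0)).1 := by
  unfold count_groups_of_ones_alt
  rw [List.foldl_reverse]

-- the second state component of B's fold is A's leading-ones count
theorem pvB_snd (cons : Int) (l : List Int) :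
    (l.foldr (fun x s => pvBStep cons s x) (0, 0)).2 = (pvAInner l).1 := by
  induction l with
  | nil => simp [pvAInner]
  | cons x r ih =>
    rw [List.foldr_cons, pvBStep]
    by_cases h0 : x = 0
    · simp [pvAInner, h0]
    · by_cases h1 : x = 1 <;> simp [pvAInner, h0, h1, ih]

-- skipping the leading 1's does not change A's outer loop (they are consumed by the else-branch)
theorem pvAGo_skip (cons : Int) (l : List Int) (c : Int) :
    pvAGo cons (pvAInner l).2 c = pvAGo cons l c := by
  induction l with
  | nil => simp [pvAInner]
  | cons x r ih =>
    by_cases h1 : x = 1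
    · have h0 : x ≠ 0 := by omega
      simp only [pvAInner, if_pos h1]
      rw [ih]
      conv_rhs => rw [pvAGo]
      simp [h0]
    · simp [pvAInner, h1]

theorem pvAGo_eq (cons : Int) (l : List Int) (c : Int) :
    pvAGo cons l c = c + (l.foldr (fun x s => pvBStep cons s x) (0, 0)).1 := by
  induction l generalizing c with
  | nil => simp [pvAGo]
  | cons x r ih =>
    by_cases h0 : x = 0
    · simp only [pvAGo, if_pos h0, List.foldr]
      simp only [pvAGo_skip]
      by_cases hc : (pvAInner r).1 ≥ cons
      · rw [if_pos hc, ih, pvBStep]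
        simp [h0, pvB_snd cons r, hc]
        omega
      · rw [if_neg hc, ih, pvBStep]
        simp [h0, pvB_snd cons r, hc]
    · simp only [pvAGo, if_neg h0, List.foldr]
      rw [ih, pvBStep]
      by_cases h1 : x = 1 <;> simp [h0, h1]

-- ===== VERDICT (by name: the statement is the Claim_ definition above) =====
theorem count_groups_of_ones_spec : Claim_equal_count_groups_of_ones := by
  intro lst cons _
  unfold Spec_count_groups_of_ones count_groups_of_ones
  rw [pvB_foldr, pvAGo_eq]
  omega
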